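-- pv_equiv track=rewrite | github.com/webitnet/100x-screener | backend/app/modules/analysis/contract_auditor.py | _get_contract_address
-- ===== SOURCE A (Python) =====
-- CHAIN_IDS = {
--     "ethereum": "1",
--     "binance-smart-chain": "56",
--     "arbitrum-one": "42161",
--     "base": "8453",
-- }
--
-- def _get_contract_address(detail: dict) -> dict | None:
--     platforms = detail.get("platforms", {})
--     for platform, address in platforms.items():
--         if address and platform in CHAIN_IDS:
--             return {"address": address, "chain_id": CHAIN_IDS[platform], "platform": platform}
--     for platform, address in platforms.items():
--         if address:
--             return {"address": address, "chain_id": "1", "platform": platform}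
--     return None
-- ===== SOURCE B (Python) =====
-- CHAIN_IDS = {
--     "ethereum": "1",
--     "binance-smart-chain": "56",
--     "arbitrum-one": "42161",
--     "base": "8453",
-- }
--
-- def _get_contract_address(detail: dict) -> dict | None:
--     fallback = None
--     for platform, address in detail.get("platforms", {}).items():
--         if address:
--             chain_id = CHAIN_IDS.get(platform)
--             if chain_id is not None:
--                 return {"address": address, "chain_id": chain_id, "platform": platform}
--             if fallback is None:
--                 fallback = (platform, address)
--     if fallback is not None:
--         platform, address = fallback
--         return {"address": address, "chain_id": "1", "platform": platform}
--     return None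
-- ===== Notes on version B (the rewrite author's own statement) =====
-- stated objective: simpler
-- what changed: Replaces A's two full passes over platforms (first for known chains, then for any truthy address) by a single pass that returns immediately on a known chain and remembers the first truthy address as a fallback.
import Mathlib
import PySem

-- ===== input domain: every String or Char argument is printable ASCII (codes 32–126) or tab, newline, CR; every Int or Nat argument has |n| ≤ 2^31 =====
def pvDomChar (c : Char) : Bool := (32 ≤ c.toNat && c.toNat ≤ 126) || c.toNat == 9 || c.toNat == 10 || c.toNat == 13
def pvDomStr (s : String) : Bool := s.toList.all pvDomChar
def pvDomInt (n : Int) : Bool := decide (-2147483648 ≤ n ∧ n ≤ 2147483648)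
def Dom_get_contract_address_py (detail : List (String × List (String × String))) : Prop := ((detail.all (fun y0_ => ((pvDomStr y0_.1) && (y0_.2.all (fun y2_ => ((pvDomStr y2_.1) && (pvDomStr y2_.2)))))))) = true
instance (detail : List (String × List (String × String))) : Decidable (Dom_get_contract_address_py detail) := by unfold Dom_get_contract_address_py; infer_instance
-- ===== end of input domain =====

-- ===== PORT A =====
-- B replaces A's two passes over platforms by one pass with a remembered fallback (simpler).
def pvChainIds : List (String × String) :=
  [("ethereum", "1"), ("binance-smart-chain", "56"), ("arbitrum-one", "42161"), ("base", "8453")]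

-- first loop: truthy address AND platform in CHAIN_IDS
def pvLoop1 : List (String × String) → Option (List (String × String))
  | [] => none
  | (platform, address) :: rest =>
    if address ≠ "" ∧ (pvChainIds.lookup platform).isSome then
      some [("address", address), ("chain_id", (pvChainIds.lookup platform).getD ""), ("platform", platform)]
    else pvLoop1 rest

-- second loop: any truthy address
def pvLoop2 : List (String × String) → Option (List (String × String))
  | [] => none
  | (platform, address) :: rest =>
    if address ≠ "" then
      some [("address", address), ("chain_id", "1"), ("platform", platform)]
    else pvLoop2 rest

def get_contract_address_py (detail : List (String × List (String × String))) : Option (List (String × String)) :=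
  let platforms := (detail.lookup "platforms").getD []
  match pvLoop1 platforms with
  | some r => some r
  | none => pvLoop2 platforms

-- ===== PORT B =====
-- single pass carrying the first-recorded fallback (platform, address)
def pvLoopB : List (String × String) → Option (String × String) → Option (List (String × String))
  | [], fb =>
    match fb with
    | some (platform, address) => some [("address", address), ("chain_id", "1"), ("platform", platform)]
    | none => none
  | (platform, address) :: rest, fb =>
    if address ≠ "" then
      match pvChainIds.lookup platform with
      | some chain_id => some [("address", address), ("chain_id", chain_id), ("platform", platform)]
      | none => pvLoopB rest (if fb.isNone then some (platform, address) else fb)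
    else pvLoopB rest fb

def get_contract_address_py_alt (detail : List (String × List (String × String))) : Option (List (String × String)) :=
  pvLoopB ((detail.lookup "platforms").getD []) none

-- ===== PRECONDITION & SPEC =====
def Spec_get_contract_address_py (detail : List (String × List (String × String))) (out : Option (List (String × String))) : Prop := out = get_contract_address_py_alt detail
instance (detail : List (String × List (String × String))) (out : Option (List (String × String))) : Decidable (Spec_get_contract_address_py detail out) := by unfold Spec_get_contract_address_py; infer_instance

-- ===== CLAIM (what is proved, stated in full; the proofs are below) =====
def Claim_equal_get_contract_address_py : Prop := ∀ (detail : List (String × List (String × String))), Dom_get_contract_address_py detail → Spec_get_contract_address_py detail (get_contract_address_py detail)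

-- ===== LEMMAS AND PROOFS =====
theorem pvLoopB_eq (xs : List (String × String)) (fb : Option (String × String)) :
    pvLoopB xs fb =
      match pvLoop1 xs with
      | some r => some r
      | none =>
        match fb with
        | some (p, a) => some [("address", a), ("chain_id", "1"), ("platform", p)]
        | none => pvLoop2 xs := by
  induction xs generalizing fb with
  | nil => cases fb <;> simp [pvLoopB, pvLoop1, pvLoop2]
  | cons hd tl ih =>
    obtain ⟨p, a⟩ := hd
    by_cases ha : a = ""
    · simp [pvLoopB, pvLoop1, pvLoop2, ha, ih]
    · cases hc : (pvChainIds.lookup p) with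
      | some cid =>
        simp [pvLoopB, pvLoop1, pvLoop2, ha, hc]
      | none =>
        cases fb <;> simp [pvLoopB, pvLoop1, pvLoop2, ha, hc, ih]

-- ===== VERDICT (by name: the statement is the Claim_ definition above) =====
theorem get_contract_address_py_spec : Claim_equal_get_contract_address_py := by
  intro detail _
  unfold Spec_get_contract_address_py get_contract_address_py get_contract_address_py_alt
  rw [pvLoopB_eq]
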